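-- pv_equiv track=rewrite | github.com/yufarui/minilm | src/dataset/pre_train_dataset.py | _stream_pack_staged
-- ===== SOURCE A (Python) =====
-- def _stream_pack_staged(
--     stream: list[int],
--     stages: list[tuple[int | None, int]],
-- ) -> tuple[list[list[int]], bool]:
--     """
--     从流头连续切分；第二项为 True 表示在某 until 阶段尚未凑满约定样本数时流已耗尽。
--     注意：此处不做样本内右侧补齐，样本可变长；padding 由 collator 统一动态处理。
--     """
--     n = len(stream)
--     pos = 0
--     chunks: list[list[int]] = []
--     emitted = 0
--
--     for until_excl, chunk_size in stages:
--         if chunk_size <= 0: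
--             raise ValueError(f"stream pack chunk_size 须为正，收到 {chunk_size}")
--
--         if until_excl is not None:
--             need = until_excl - emitted
--             if need <= 0:
--                 continue
--             for _ in range(need):
--                 if pos >= n:
--                     return chunks, True
--                 end = pos + chunk_size
--                 piece = stream[pos:end]
--                 pos = end
--                 chunks.append(list(piece))
--                 emitted += 1
--             continue
--
--         while pos < n:
--             end = pos + chunk_size
--             piece = stream[pos:end]
--             pos = end
--             chunks.append(list(piece))
--             emitted += 1
--         return chunks, False
--
--     return chunks, False
-- ===== SOURCE B (Python) =====
-- def _stream_pack_staged(
--     stream: list[int],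
--     stages: list[tuple[int | None, int]],
-- ) -> tuple[list[list[int]], bool]:
--     # Phase 1: walk the stages purely arithmetically (no slicing) to build a flat
--     # schedule of chunk sizes, plus the drain size of a None stage or the
--     # exhaustion flag; validation stays lazy, in A's stage order.
--     n = len(stream)
--     schedule: list[int] = []
--     pos = 0
--     emitted = 0
--     exhausted = False
--     drain: int | None = None
--     for until_excl, chunk_size in stages:
--         if chunk_size <= 0:
--             raise ValueError(f"stream pack chunk_size 须为正，收到 {chunk_size}")
--         if until_excl is None:
--             drain = chunk_size
--             break
--         need = until_excl - emitted
--         if need <= 0: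
--             continue
--         if pos >= n:
--             exhausted = True
--             break
--         avail = -(-(n - pos) // chunk_size)  # chunks until the stream runs out
--         k = min(need, avail)
--         schedule.extend([chunk_size] * k)
--         pos += k * chunk_size
--         emitted += k
--         if k < need:
--             exhausted = True
--             break
--     # Phase 2: one slicing pass over the flat schedule, then the optional drain.
--     chunks: list[list[int]] = []
--     p = 0
--     for size in schedule:
--         chunks.append(stream[p:p + size])
--         p += size
--     if exhausted:
--         return chunks, True
--     if drain is not None:
--         while p < n:
--             chunks.append(stream[p:p + drain])
--             p += drain
--     return chunks, False
-- ===== Notes on version B (the rewrite author's own statement) =====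
-- stated objective: alternative
-- what changed: B replaces A's interleaved nesting (stage loop containing the slicing loops) by a two-phase decomposition: phase 1 walks the stages purely arithmetically (ceil-division counts instead of per-chunk iteration) to build a flat schedule of chunk sizes plus a drain size or exhaustion flag, keeping A's lazy per-stage ValueError order; phase 2 is one flat slicing pass plus the optional drain.
-- outside the precondition, e.g. on _stream_pack_staged([1, 2, 3], [(3, 2), (9, 0)]): A returns ([[1, 2], [3]], True), B returns ([[1, 2], [3]], True)
import Mathlib
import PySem

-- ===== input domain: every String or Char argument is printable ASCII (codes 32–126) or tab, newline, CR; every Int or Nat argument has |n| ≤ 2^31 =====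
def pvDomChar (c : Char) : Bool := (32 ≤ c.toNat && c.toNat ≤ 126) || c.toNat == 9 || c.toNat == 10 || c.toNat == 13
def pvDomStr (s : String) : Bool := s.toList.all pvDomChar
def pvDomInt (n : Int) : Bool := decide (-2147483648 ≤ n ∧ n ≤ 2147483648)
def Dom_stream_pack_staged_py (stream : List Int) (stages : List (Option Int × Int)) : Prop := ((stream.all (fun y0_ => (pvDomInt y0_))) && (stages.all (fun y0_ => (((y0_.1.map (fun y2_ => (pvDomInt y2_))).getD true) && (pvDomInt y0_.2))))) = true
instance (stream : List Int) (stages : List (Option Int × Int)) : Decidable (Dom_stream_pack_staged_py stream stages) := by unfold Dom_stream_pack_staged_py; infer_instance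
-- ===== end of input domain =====

-- B replaces A's interleaved stage/slice nesting by a two-phase decomposition
-- (arithmetic schedule building with ceil-division counts, then one flat slicing
-- pass plus the optional drain); objective: alternative structure, same cost.

-- ===== PORT A =====
-- A's inner `for _ in range(need)` loop: runs k times; early-returns (chunks, True)
-- when the stream is exhausted, else yields the updated (pos, chunks, emitted).
def pvA_stage (stream : List Int) (n chunk_size : Int) :
    Nat → Int → List (List Int) → Int →
    Sum (List (List Int) × Bool) (Int × List (List Int) × Int)
  | 0, pos, chunks, emitted => .inr (pos, chunks, emitted)
  | k + 1, pos, chunks, emitted =>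
    if pos ≥ n then .inl (chunks, true)
    else pvA_stage stream n chunk_size k (pos + chunk_size)
      (chunks ++ [PySem.List.slice stream pos (pos + chunk_size)]) (emitted + 1)

-- A's `while pos < n` drain loop; fuel (n - pos).toNat bounds the iterations since
-- each step consumes chunk_size ≥ 1 positions (chunk_size ≤ 0 is excluded by Pre_).
def pvA_drain (stream : List Int) (n chunk_size : Int) :
    Nat → Int → List (List Int) → List (List Int)
  | 0, _, chunks => chunks
  | fuel + 1, pos, chunks =>
    if pos < n then
      pvA_drain stream n chunk_size fuel (pos + chunk_size)
        (chunks ++ [PySem.List.slice stream pos (pos + chunk_size)])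
    else chunks

-- A's outer `for until_excl, chunk_size in stages` loop.
def pvA_go (stream : List Int) (n : Int) :
    List (Option Int × Int) → Int → List (List Int) → Int → List (List Int) × Bool
  | [], _, chunks, _ => (chunks, false)
  | (until_excl, chunk_size) :: rest, pos, chunks, emitted =>
    match until_excl with
    | some u =>
      let need := u - emitted
      if need ≤ 0 then pvA_go stream n rest pos chunks emitted
      else
        match pvA_stage stream n chunk_size need.toNat pos chunks emitted with
        | .inl r => r
        | .inr (pos', chunks', emitted') => pvA_go stream n rest pos' chunks' emitted'
    | none => (pvA_drain stream n chunk_size (n - pos).toNat pos chunks, false)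

def stream_pack_staged_py (stream : List Int) (stages : List (Option Int × Int)) :
    List (List Int) × Bool :=
  pvA_go stream (stream.length : Int) stages 0 [] 0

-- ===== PORT B =====
-- Phase 1: walk the stages arithmetically, building the flat schedule of chunk
-- sizes plus (drain size from a None stage, exhaustion flag); the per-stage chunk
-- count is the ceiling division -(-(n - pos) // chunk_size) capped by need.
def pvB_sched (n : Int) : List (Option Int × Int) → Int → Int →
    List Int × Option Int × Bool
  | [], _, _ => ([], none, false)
  | (until_excl, chunk_size) :: rest, pos, emitted =>
    match until_excl with
    | none => ([], some chunk_size, false)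
    | some u =>
      let need := u - emitted
      if need ≤ 0 then pvB_sched n rest pos emitted
      else if pos ≥ n then ([], none, true)
      else
        let avail := -(PySem.Int.floordiv (-(n - pos)) chunk_size)
        let k := min need avail
        if k < need then (List.replicate k.toNat chunk_size, none, true)
        else
          let r := pvB_sched n rest (pos + k * chunk_size) (emitted + k)
          (List.replicate k.toNat chunk_size ++ r.1, r.2.1, r.2.2)

-- Phase 2: one slicing pass over the flat schedule.
def pvB_slice (stream : List Int) : List Int → Int → List (List Int) →
    Int × List (List Int)
  | [], p, chunks => (p, chunks)
  | size :: rest, p, chunks =>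
    pvB_slice stream rest (p + size) (chunks ++ [PySem.List.slice stream p (p + size)])

-- B's drain `while p < n` loop (same fuel bound as A's).
def pvB_drain (stream : List Int) (n ds : Int) :
    Nat → Int → List (List Int) → List (List Int)
  | 0, _, chunks => chunks
  | fuel + 1, p, chunks =>
    if p < n then
      pvB_drain stream n ds fuel (p + ds)
        (chunks ++ [PySem.List.slice stream p (p + ds)])
    else chunks

def stream_pack_staged_py_alt (stream : List Int) (stages : List (Option Int × Int)) :
    List (List Int) × Bool :=
  let n : Int := (stream.length : Int)
  let r := pvB_sched n stages 0 0
  let s := pvB_slice stream r.1 0 []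
  if r.2.2 then (s.2, true)
  else match r.2.1 with
    | some ds => (pvB_drain stream n ds (n - s.1).toNat s.1 s.2, false)
    | none => (s.2, false)

-- ===== PRECONDITION & SPEC =====
-- Pre_ excludes stage lists whose prefix up to and including the first None stage
-- contains a non-positive chunk_size: whenever A reaches such a stage it raises
-- ValueError and B raises identically there (the Lean ports are total, so these
-- inputs must be excluded); on the excluded inputs where exhaustion makes A return
-- before the bad stage, B returns the same value (see the cite).
def pvPosPfx : List (Option Int × Int) → Bool
  | [] => true
  | (until_excl, chunk_size) :: rest =>
    decide (0 < chunk_size) &&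
      (match until_excl with | none => true | some _ => pvPosPfx rest)

def Pre_stream_pack_staged_py (stream : List Int) (stages : List (Option Int × Int)) : Prop :=
  pvPosPfx stages = true
instance (stream : List Int) (stages : List (Option Int × Int)) :
    Decidable (Pre_stream_pack_staged_py stream stages) := by
  unfold Pre_stream_pack_staged_py; infer_instance

def pvWitness_stream_pack_staged_py : List Int × (List (Option Int × Int)) :=
  ([1, 2, 3, 4, 5], [(some 2, 2), (none, 3)])

def Spec_stream_pack_staged_py (stream : List Int) (stages : List (Option Int × Int))
    (out : List (List Int) × Bool) : Prop := out = stream_pack_staged_py_alt stream stages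
instance (stream : List Int) (stages : List (Option Int × Int)) (out : List (List Int) × Bool) :
    Decidable (Spec_stream_pack_staged_py stream stages out) := by
  unfold Spec_stream_pack_staged_py; infer_instance

-- ===== CLAIM (what is proved, stated in full; the proofs are below) =====
def Claim_equal_stream_pack_staged_py : Prop := ∀ (stream : List Int) (stages : List (Option Int × Int)), Dom_stream_pack_staged_py stream stages → Pre_stream_pack_staged_py stream stages → Spec_stream_pack_staged_py stream stages (stream_pack_staged_py stream stages)

-- ===== LEMMAS AND PROOFS =====

-- The two drain loops are the same recursion.
theorem pv_drain_eq (stream : List Int) (n cs : Int) :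
    ∀ (fuel : Nat) (pos : Int) (chunks : List (List Int)),
      pvA_drain stream n cs fuel pos chunks = pvB_drain stream n cs fuel pos chunks := by
  intro fuel
  induction fuel with
  | zero => intro pos chunks; rfl
  | succ f ih =>
    intro pos chunks
    simp only [pvA_drain, pvB_drain]
    split
    · exact ih _ _
    · rfl

-- A's bounded stage loop, when every exhaustion check passes, equals slicing the
-- replicated schedule and advancing pos and emitted by m chunks.
theorem pv_stage_full (stream : List Int) (n cs : Int) (hcs : 0 < cs) :
    ∀ (m : Nat) (pos : Int) (chunks : List (List Int)) (emitted : Int),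
      pos + ((m : Int) - 1) * cs < n →
      pvA_stage stream n cs m pos chunks emitted =
        .inr ((pvB_slice stream (List.replicate m cs) pos chunks).1,
              (pvB_slice stream (List.replicate m cs) pos chunks).2,
              emitted + (m : Int)) := by
  intro m
  induction m with
  | zero => intro pos chunks emitted _; simp [pvA_stage, pvB_slice]
  | succ m ih =>
    intro pos chunks emitted h
    have h' : pos + (m : Int) * cs < n := by push_cast at h; linarith
    have hlt : pos < n := by nlinarith [mul_nonneg (Int.natCast_nonneg m) hcs.le]
    simp only [pvA_stage, List.replicate_succ, pvB_slice, if_neg (not_le.mpr hlt)]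
    rw [ih (pos + cs) _ (emitted + 1) (by linarith)]
    push_cast
    ring_nf

-- A's bounded stage loop, when it exhausts after exactly k chunks (k < fuel),
-- early-returns the chunks sliced from the length-k replicated schedule.
theorem pv_stage_exh (stream : List Int) (n cs : Int) (hcs : 0 < cs) :
    ∀ (k m : Nat) (pos : Int) (chunks : List (List Int)) (emitted : Int),
      k < m → n ≤ pos + (k : Int) * cs → (k = 0 ∨ pos + ((k : Int) - 1) * cs < n) →
      pvA_stage stream n cs m pos chunks emitted =
        .inl ((pvB_slice stream (List.replicate k cs) pos chunks).2, true) := by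
  intro k
  induction k with
  | zero =>
    intro m pos chunks emitted hm hn _
    rcases m with _ | m
    · omega
    simp only [pvA_stage, pvB_slice, List.replicate]
    rw [if_pos (by omega)]
  | succ k ih =>
    intro m pos chunks emitted hm hn hprev
    rcases m with _ | m
    · omega
    have hk : pos + (k : Int) * cs < n := by
      rcases hprev with h | h
      · omega
      · push_cast at h; linarith
    have hlt : pos < n := by nlinarith [Int.natCast_nonneg k]
    simp only [pvA_stage, List.replicate_succ, pvB_slice, if_neg (not_le.mpr hlt)]
    apply ih m _ _ _ (by omega) (by push_cast at hn; linarith)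
    rcases Nat.eq_zero_or_pos k with h0 | h0
    · left; exact h0
    · right; push_cast; linarith

-- Slicing splits over list append.
theorem pv_slice_append (stream : List Int) :
    ∀ (a b : List Int) (pos : Int) (chunks : List (List Int)),
      pvB_slice stream (a ++ b) pos chunks =
        pvB_slice stream b (pvB_slice stream a pos chunks).1
          (pvB_slice stream a pos chunks).2 := by
  intro a
  induction a with
  | nil => intro b pos chunks; rfl
  | cons x xs ih => intro b pos chunks; simp only [List.cons_append, pvB_slice]; exact ih _ _ _

-- Slicing a replicated schedule advances the position by m * cs.
theorem pv_slice_replicate_fst (stream : List Int) (cs : Int) :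
    ∀ (m : Nat) (pos : Int) (chunks : List (List Int)),
      (pvB_slice stream (List.replicate m cs) pos chunks).1 = pos + (m : Int) * cs := by
  intro m
  induction m with
  | zero => intro pos chunks; simp [pvB_slice]
  | succ m ih =>
    intro pos chunks
    simp only [List.replicate_succ, pvB_slice, ih]
    push_cast; ring

-- Main invariant: from any matching state, A's outer loop equals B's
-- schedule-then-slice composition.
theorem pv_main (stream : List Int) (n : Int) :
    ∀ (stages : List (Option Int × Int)) (pos : Int) (chunks : List (List Int))
      (emitted : Int), pvPosPfx stages = true →
      pvA_go stream n stages pos chunks emitted =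
        (let r := pvB_sched n stages pos emitted
         let s := pvB_slice stream r.1 pos chunks
         if r.2.2 then (s.2, true)
         else match r.2.1 with
           | some ds => (pvB_drain stream n ds (n - s.1).toNat s.1 s.2, false)
           | none => (s.2, false)) := by
  intro stages
  induction stages with
  | nil => intro pos chunks emitted _; rfl
  | cons st rest ih =>
    intro pos chunks emitted hpre
    rcases st with ⟨u?, cs⟩
    rcases u? with _ | u
    · -- None stage: drain
      simp only [pvPosPfx, Bool.and_eq_true, decide_eq_true_eq] at hpre
      simp only [pvA_go, pvB_sched, pvB_slice]
      rw [pv_drain_eq]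
      simp
    · -- bounded stage
      simp only [pvPosPfx, Bool.and_eq_true, decide_eq_true_eq] at hpre
      obtain ⟨hcs, hrest⟩ := hpre
      simp only [pvA_go, pvB_sched]
      by_cases hle : u - emitted ≤ 0
      · rw [if_pos hle, if_pos hle]; exact ih pos chunks emitted hrest
      · rw [if_neg hle, if_neg hle]
        have hneed : 0 < u - emitted := by omega
        by_cases hpos : pos ≥ n
        · -- immediately exhausted
          rw [if_pos hpos]
          have : (u - emitted).toNat = ((u - emitted).toNat - 1) + 1 := by omega
          rw [this]
          simp [pvA_stage, if_pos hpos, pvB_slice]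
        · rw [if_neg hpos]
          set avail := -(PySem.Int.floordiv (-(n - pos)) cs) with havail
          have hav : ((avail - 1) * cs < n - pos ∧ n - pos ≤ avail * cs) :=
            (PySem.Int.neg_floordiv_neg_eq_iff_of_pos hcs).mp havail.symm
          set k := min (u - emitted) avail with hk
          have hk0 : 0 < k := by
            have : 0 < avail := by nlinarith [hav.1, hav.2]
            omega
          by_cases hkn : k < u - emitted
          · -- exhaustion inside this stage: k = avail
            have hka : k = avail := by omega
            rw [if_pos hkn]
            rw [pv_stage_exh stream n cs hcs k.toNat (u - emitted).toNat pos chunks emitted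
              (by omega) (by rw [Int.toNat_of_nonneg (by omega), hka]; linarith [hav.2])
              (by right; rw [Int.toNat_of_nonneg (by omega), hka]; linarith [hav.1])]
            simp
          · -- stage completes: k = need
            have hkeq : k = u - emitted := by omega
            have hkN : (u - emitted).toNat = k.toNat := by omega
            have hcast : ((k.toNat : Nat) : Int) = k := Int.toNat_of_nonneg hk0.le
            rw [if_neg hkn]
            rw [pv_stage_full stream n cs hcs (u - emitted).toNat pos chunks emitted
              (by rw [Int.toNat_of_nonneg (by omega)]
                  have hua : u - emitted ≤ avail := by omega
                  nlinarith [hav.1])]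
            simp only []
            rw [hkN, pv_slice_replicate_fst, pv_slice_append, pv_slice_replicate_fst, hcast]
            rw [ih (pos + k * cs) ((pvB_slice stream (List.replicate k.toNat cs) pos chunks).2)
              (emitted + k) hrest]

-- ===== VERDICT (by name: the statement is the Claim_ definition above) =====
theorem stream_pack_staged_py_spec : Claim_equal_stream_pack_staged_py := by
  intro stream stages _ hpre
  show stream_pack_staged_py stream stages = stream_pack_staged_py_alt stream stages
  unfold stream_pack_staged_py stream_pack_staged_py_alt
  exact pv_main stream (stream.length : Int) stages 0 [] 0 hpre
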